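-- pv_equiv track=rewrite | github.com/PolicyUncertainty/analysis | src/estimation/struct_estimation/estimate_setup.py | get_gendered_params
-- ===== SOURCE A (Python) =====
-- def get_gendered_params(params_to_estimate_names, append):
--     gender_params = [
--         param_name for param_name in params_to_estimate_names if append in param_name
--     ]
--
--     disutil_params = [
--         param_name for param_name in gender_params if "disutil_" in param_name
--     ]
--     disutil_params_pt_params = [
--         param_name for param_name in disutil_params if "pt_work" in param_name
--     ]
--     disutil_params_ft_params = [
--         param_name for param_name in disutil_params if "ft_work" in param_name
--     ]
--     job_finding_params = [
--         param_name for param_name in gender_params if "job_finding_" in param_name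
--     ]
--
--     # We do it this weird way for printing order
--     params = {}
--     if f"disutil_unemployed{append}" in disutil_params:
--         params["unemployed"] = [f"disutil_unemployed{append}"]
--
--     if len(disutil_params_ft_params) > 0:
--         params["full-time"] = disutil_params_ft_params
--
--     if len(disutil_params_pt_params) > 0:
--         params["part-time"] = disutil_params_pt_params
--
--     if len(job_finding_params) > 0:
--         params["job_finding"] = job_finding_params
--
--     # We drop these directly afterwards
--     if len(gender_params) > 0:
--         params["all"] = gender_params
--     return params
-- ===== SOURCE B (Python) =====
-- def get_gendered_params(params_to_estimate_names, append):
--     unemp_name = f"disutil_unemployed{append}"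
--     all_params, ft, pt, jf = [], [], [], []
--     has_unemp = False
--     for name in params_to_estimate_names:
--         if append not in name:
--             continue
--         all_params.append(name)
--         if "disutil_" in name:
--             if "ft_work" in name:
--                 ft.append(name)
--             if "pt_work" in name:
--                 pt.append(name)
--             if name == unemp_name:
--                 has_unemp = True
--         if "job_finding_" in name:
--             jf.append(name)
--     params = {}
--     if has_unemp:
--         params["unemployed"] = [unemp_name]
--     if ft:
--         params["full-time"] = ft
--     if pt:
--         params["part-time"] = pt
--     if jf:
--         params["job_finding"] = jf
--     if all_params:
--         params["all"] = all_params
--     return params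
-- ===== Notes on version B (the rewrite author's own statement) =====
-- stated objective: alternative
-- what changed: Replaced A's five sequential filtering list comprehensions (plus a membership scan) with a single loop over the names that dispatches each matching name into the all/ft/pt/job_finding buckets and notes the unemployed sentinel inline, then builds the dict in the same fixed order.
import Mathlib
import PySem

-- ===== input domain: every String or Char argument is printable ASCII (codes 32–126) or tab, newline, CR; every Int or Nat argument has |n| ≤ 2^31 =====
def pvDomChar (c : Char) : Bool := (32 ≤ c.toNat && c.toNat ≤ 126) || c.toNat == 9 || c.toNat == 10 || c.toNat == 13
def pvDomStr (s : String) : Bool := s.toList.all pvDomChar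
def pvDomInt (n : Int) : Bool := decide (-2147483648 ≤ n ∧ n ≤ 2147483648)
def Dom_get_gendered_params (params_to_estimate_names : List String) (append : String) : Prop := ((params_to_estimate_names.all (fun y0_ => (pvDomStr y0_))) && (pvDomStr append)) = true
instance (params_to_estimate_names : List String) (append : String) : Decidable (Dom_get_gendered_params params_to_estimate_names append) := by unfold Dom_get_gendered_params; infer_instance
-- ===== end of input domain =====

-- B replaces A's five sequential filtering comprehensions by one loop that dispatches each
-- name into the buckets as it goes (objective: alternative single-pass decomposition).


-- ===== PORT A =====
def get_gendered_params (params_to_estimate_names : List String) (append : String) : List (String × List String) :=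
  let gender_params := params_to_estimate_names.filter (fun p => PySem.Str.isIn append p)
  let disutil_params := gender_params.filter (fun p => PySem.Str.isIn "disutil_" p)
  let disutil_params_pt_params := disutil_params.filter (fun p => PySem.Str.isIn "pt_work" p)
  let disutil_params_ft_params := disutil_params.filter (fun p => PySem.Str.isIn "ft_work" p)
  let job_finding_params := gender_params.filter (fun p => PySem.Str.isIn "job_finding_" p)
  let unemp := "disutil_unemployed" ++ append
  let params : PySem.Dict String (List String) := PySem.Dict.empty
  let params := if disutil_params.contains unemp then params.insert "unemployed" [unemp] else params
  let params := if disutil_params_ft_params.length > 0 then params.insert "full-time" disutil_params_ft_params else params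
  let params := if disutil_params_pt_params.length > 0 then params.insert "part-time" disutil_params_pt_params else params
  let params := if job_finding_params.length > 0 then params.insert "job_finding" job_finding_params else params
  let params := if gender_params.length > 0 then params.insert "all" gender_params else params
  params.items

-- ===== PORT B =====
-- one fold step of B's loop: state = (all, ft, pt, jf, has_unemp)
def pvAltStep (append unemp : String)
    (st : List String × List String × List String × List String × Bool) (name : String) :
    List String × List String × List String × List String × Bool :=
  if PySem.Str.isIn append name then
    let d := PySem.Str.isIn "disutil_" name
    ( st.1 ++ [name]
    , if d && PySem.Str.isIn "ft_work" name then st.2.1 ++ [name] else st.2.1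
    , if d && PySem.Str.isIn "pt_work" name then st.2.2.1 ++ [name] else st.2.2.1
    , if PySem.Str.isIn "job_finding_" name then st.2.2.2.1 ++ [name] else st.2.2.2.1
    , st.2.2.2.2 || (d && name == unemp) )
  else st

def get_gendered_params_alt (params_to_estimate_names : List String) (append : String) : List (String × List String) :=
  let unemp := "disutil_unemployed" ++ append
  let st := params_to_estimate_names.foldl (pvAltStep append unemp) ([], [], [], [], false)
  let out : List (String × List String) := if st.2.2.2.2 then [("unemployed", [unemp])] else []
  let out := if st.2.1 ≠ [] then out ++ [("full-time", st.2.1)] else out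
  let out := if st.2.2.1 ≠ [] then out ++ [("part-time", st.2.2.1)] else out
  let out := if st.2.2.2.1 ≠ [] then out ++ [("job_finding", st.2.2.2.1)] else out
  if st.1 ≠ [] then out ++ [("all", st.1)] else out

-- ===== PRECONDITION & SPEC =====
def Spec_get_gendered_params (params_to_estimate_names : List String) (append : String) (out : List (String × List String)) : Prop := out = get_gendered_params_alt params_to_estimate_names append
instance (params_to_estimate_names : List String) (append : String) (out : List (String × List String)) : Decidable (Spec_get_gendered_params params_to_estimate_names append out) := by unfold Spec_get_gendered_params; infer_instance

-- ===== CLAIM (what is proved, stated in full; the proofs are below) =====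
def Claim_equal_get_gendered_params : Prop := ∀ (params_to_estimate_names : List String) (append : String), Dom_get_gendered_params params_to_estimate_names append → Spec_get_gendered_params params_to_estimate_names append (get_gendered_params params_to_estimate_names append)

-- ===== LEMMAS AND PROOFS =====

-- invariant of B's single loop: the fold is the five quantities A computes, appended to the accumulators
lemma pvAltStep_fold_spec (append unemp : String) (names : List String)
    (a f p j : List String) (u : Bool) :
    names.foldl (pvAltStep append unemp) (a, f, p, j, u) =
      ( a ++ names.filter (fun n => PySem.Str.isIn append n)
      , f ++ names.filter (fun n => PySem.Str.isIn append n && PySem.Str.isIn "disutil_" n && PySem.Str.isIn "ft_work" n)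
      , p ++ names.filter (fun n => PySem.Str.isIn append n && PySem.Str.isIn "disutil_" n && PySem.Str.isIn "pt_work" n)
      , j ++ names.filter (fun n => PySem.Str.isIn append n && PySem.Str.isIn "job_finding_" n)
      , u || names.any (fun n => PySem.Str.isIn append n && PySem.Str.isIn "disutil_" n && n == unemp) ) := by
  induction names generalizing a f p j u with
  | nil => simp
  | cons x xs ih =>
    simp only [List.foldl_cons, List.filter_cons, List.any_cons, pvAltStep]
    by_cases hg : PySem.Str.isIn append x
    · simp only [hg, if_pos, Bool.true_and]
      rw [ih]
      split_ifs <;> simp_all [Bool.or_assoc]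
    · simp only [hg]
      rw [ih]
      simp

-- nested filters of A collapse to B's one-pass predicates (exact shapes of these two programs)
lemma pvFilter2 (p q : String → Bool) (l : List String) :
    (l.filter p).filter q = l.filter (fun n => p n && q n) := by
  rw [List.filter_filter]
  exact List.filter_congr (fun x _ => by cases p x <;> cases q x <;> rfl)

lemma pvContains1 (p : String → Bool) (l : List String) (a : String) :
    (l.filter p).contains a = l.any (fun n => p n && n == a) := by
  rw [List.contains_eq_any_beq, List.any_filter]
  congr 1
  funext x
  cases p x <;> simp [eq_comm]

theorem get_gendered_params_spec : Claim_equal_get_gendered_params := by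
  intro names append _
  show get_gendered_params names append = get_gendered_params_alt names append
  unfold get_gendered_params get_gendered_params_alt
  simp only [pvAltStep_fold_spec, List.nil_append, Bool.false_or, pvFilter2, pvContains1,
    gt_iff_lt, List.length_pos_iff]
  split_ifs <;>
    simp [PySem.Dict.items_insert_of_not_contains, PySem.Dict.contains_insert, PySem.Dict.empty]
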